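-- pv_equiv track=rewrite | github.com/dnhphuong-05/python | Bài toan sắp xếp công việc.py | assign_jobs_equal_machines
-- ===== SOURCE A (Python) =====
-- import heapq
--
-- def assign_jobs_equal_machines(jobs, m):
--     machines = [0] * m
--     # Sắp xếp công việc theo thời gian giảm dần
--     jobs.sort(reverse=True)
--
--     for job in jobs:
--         # Đưa công việc vào máy có tổng thời gian hiện tại thấp nhất
--         min_machine = heapq.heappop(machines)
--         min_machine += job
--         heapq.heappush(machines, min_machine)
--
--     # Thời gian hoàn tất công việc là thời gian của máy có tổng lớn nhất
--     return max(machines)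
-- ===== SOURCE B (Python) =====
-- def assign_jobs_equal_machines(jobs, m):
--     machines = [0] * m
--     jobs.sort(reverse=True)
--
--     for job in jobs:
--         # linear scan for the index of the least-loaded machine (no heap)
--         idx = 0
--         best = machines[0]
--         for i, load in enumerate(machines):
--             if load < best:
--                 idx = i
--                 best = load
--         machines[idx] += job
--
--     return max(machines)
-- ===== Notes on version B (the rewrite author's own statement) =====
-- stated objective: simpler
-- what changed: Replaces the heapq priority queue with a plain list of loads and a linear scan for the least-loaded machine's index, updated in place.
import Mathlib
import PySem

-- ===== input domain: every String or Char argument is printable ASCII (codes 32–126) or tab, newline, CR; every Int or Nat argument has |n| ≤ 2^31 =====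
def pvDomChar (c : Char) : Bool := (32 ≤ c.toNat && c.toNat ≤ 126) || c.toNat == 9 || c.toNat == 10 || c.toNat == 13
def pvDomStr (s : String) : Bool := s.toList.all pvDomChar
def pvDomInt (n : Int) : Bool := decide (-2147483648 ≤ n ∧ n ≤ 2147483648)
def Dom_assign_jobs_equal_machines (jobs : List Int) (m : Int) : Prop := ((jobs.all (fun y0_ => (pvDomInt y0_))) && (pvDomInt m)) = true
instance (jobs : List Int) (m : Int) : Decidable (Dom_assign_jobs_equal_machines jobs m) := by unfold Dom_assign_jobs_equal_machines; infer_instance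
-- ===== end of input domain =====

-- B replaces A's heapq priority queue by a plain list of loads and a linear scan for
-- the least-loaded machine (objective: simpler).  Both A and B sort `jobs` in place;
-- the equivalence proved here is about the RETURN value (the in-place sort is
-- identical in both).

-- ===== PORT A =====
-- heapq.heappop / heapq.heappush are library calls; they are ported by hand at the
-- level of the heap's contents: heappop returns the minimum element of the heap and
-- removes one occurrence of it, heappush adds its argument.  This is exact for every
-- value A's code names (the popped minimum, min_machine, and max(machines), which
-- depend only on the multiset of loads); the internal array layout of the CPython
-- binary heap is not reproduced.
def pvHeappop (h : List Int) : Option (Int × List Int) :=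
  match PySem.List.min? h (fun x => x) with
  | none => none            -- IndexError: pop from empty heap
  | some v => some (v, h.erase v)

def pvHeappush (h : List Int) (x : Int) : List Int := h ++ [x]

def pvStepA (acc : Option (List Int)) (job : Int) : Option (List Int) :=
  match acc with
  | none => none
  | some h =>
    match pvHeappop h with
    | none => none
    | some (mn, rest) =>
      -- min_machine += job; heappush(machines, min_machine)
      some (pvHeappush rest (mn + job))

def assign_jobs_equal_machines (jobs : List Int) (m : Int) : Int :=
  let machines : List Int := List.replicate m.toNat 0      -- [0] * m
  let js := PySem.List.sorted jobs (fun x => x) true        -- jobs.sort(reverse=True)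
  match js.foldl pvStepA (some machines) with
  | none => 0                                               -- IndexError (excluded by Pre_)
  | some h =>
    match PySem.List.max? h (fun x => x) with
    | none => 0                                             -- ValueError: max([]) (excluded by Pre_)
    | some v => v

-- ===== PORT B =====
-- idx = 0; best = machines[0]
-- for i, load in enumerate(machines):
--     if load < best: idx = i; best = load
-- machines[idx] += job
-- (the enumerate loop is rendered, exactly, as a fold over machines carrying the
--  running index i as extra state)
def altStep (mach : List Int) (job : Int) : Option (List Int) :=
  match PySem.List.pyGet? mach 0 with
  | none => none            -- IndexError: machines[0] of an empty list
  | some b0 =>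
    let s := mach.foldl
      (fun (s : Int × Int × Int) load =>
        (s.1 + 1, if load < s.2.2 then (s.1, load) else s.2)) (0, 0, b0)
    some (mach.set s.2.1.toNat (PySem.List.pyGetD mach s.2.1 0 + job))

def pvStepB (acc : Option (List Int)) (job : Int) : Option (List Int) :=
  match acc with
  | none => none
  | some mach => altStep mach job

def assign_jobs_equal_machines_alt (jobs : List Int) (m : Int) : Int :=
  let machines : List Int := List.replicate m.toNat 0
  let js := PySem.List.sorted jobs (fun x => x) true
  match js.foldl pvStepB (some machines) with
  | none => 0                                               -- IndexError (excluded by Pre_)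
  | some fin =>
    match PySem.List.max? fin (fun x => x) with
    | none => 0                                             -- ValueError (excluded by Pre_)
    | some v => v

-- ===== PRECONDITION & SPEC =====
-- Pre_ excludes exactly the raising inputs: with m < 1 the machine list is empty, so
-- A raises (IndexError from heappop if jobs ≠ [], else ValueError from max([])); B
-- raises the same exceptions there.
def Pre_assign_jobs_equal_machines (jobs : List Int) (m : Int) : Prop := 1 ≤ m
instance (jobs : List Int) (m : Int) : Decidable (Pre_assign_jobs_equal_machines jobs m) := by unfold Pre_assign_jobs_equal_machines; infer_instance
def pvWitness_assign_jobs_equal_machines : List Int × Int := ([3, 1, 4, 2], 2)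

def Spec_assign_jobs_equal_machines (jobs : List Int) (m : Int) (out : Int) : Prop := out = assign_jobs_equal_machines_alt jobs m
instance (jobs : List Int) (m : Int) (out : Int) : Decidable (Spec_assign_jobs_equal_machines jobs m out) := by unfold Spec_assign_jobs_equal_machines; infer_instance

-- ===== CLAIM (what is proved, stated in full; the proofs are below) =====
def Claim_equal_assign_jobs_equal_machines : Prop := ∀ (jobs : List Int) (m : Int), Dom_assign_jobs_equal_machines jobs m → Pre_assign_jobs_equal_machines jobs m → Spec_assign_jobs_equal_machines jobs m (assign_jobs_equal_machines jobs m)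

-- ===== LEMMAS AND PROOFS =====

-- The running-index minimum scan: the final (idx, best) pair is the start pair or
-- (i0 + k, l[k]) for some position k, and best is minimal among them.
theorem scan_spec (l : List Int) (i0 idx0 best0 : Int) :
    let r := l.foldl
      (fun (s : Int × Int × Int) load =>
        (s.1 + 1, if load < s.2.2 then (s.1, load) else s.2)) (i0, idx0, best0)
    (r.2 = (idx0, best0) ∨ ∃ (k : Nat) (hk : k < l.length), r.2 = (i0 + (k : Int), l[k])) ∧
      r.2.2 ≤ best0 ∧ ∀ x ∈ l, r.2.2 ≤ x := by
  induction l generalizing i0 idx0 best0 with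
  | nil => exact ⟨Or.inl rfl, le_refl _, by simp⟩
  | cons a t ih =>
    simp only [List.foldl_cons]
    by_cases hc : a < best0
    · have H := ih (i0 + 1) i0 a
      rw [if_pos hc]
      refine ⟨?_, le_trans H.2.1 (le_of_lt hc), ?_⟩
      · rcases H.1 with h | ⟨k, hk, hkeq⟩
        · exact Or.inr ⟨0, by simp, by simpa using h⟩
        · refine Or.inr ⟨k + 1, by simpa using hk, ?_⟩
          rw [hkeq]; congr 1; push_cast; ring
      · intro x hx
        rcases List.mem_cons.mp hx with h | h
        · subst h; exact H.2.1
        · exact H.2.2 x h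
    · have H := ih (i0 + 1) idx0 best0
      rw [if_neg hc]
      refine ⟨?_, H.2.1, ?_⟩
      · rcases H.1 with h | ⟨k, hk, hkeq⟩
        · exact Or.inl h
        · refine Or.inr ⟨k + 1, by simpa using hk, ?_⟩
          rw [hkeq]; congr 1; push_cast; ring
      · intro x hx
        rcases List.mem_cons.mp hx with h | h
        · subst h; exact le_trans H.2.1 (not_lt.mp hc)
        · exact H.2.2 x h

-- One B step on a nonempty list replaces one minimal load a by a + job.
theorem altStep_spec (mach : List Int) (job : Int) (hne : mach ≠ []) :
    ∃ (i : Nat) (hi : i < mach.length),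
      altStep mach job = some (mach.set i (mach[i] + job)) ∧
      ∀ x ∈ mach, mach[i] ≤ x := by
  have hlen : 0 < mach.length := List.length_pos_iff.mpr hne
  have hget0 : PySem.List.pyGet? mach 0 = some mach[0] := by
    have := PySem.List.pyGet?_natCast (xs := mach) (n := 0)
    simpa [List.getElem?_eq_getElem hlen] using this
  have H := scan_spec mach 0 0 mach[0]
  set r := mach.foldl
    (fun (s : Int × Int × Int) load =>
      (s.1 + 1, if load < s.2.2 then (s.1, load) else s.2)) (0, 0, mach[0]) with hr
  have hform : ∃ (k : Nat) (hk : k < mach.length), r.2 = ((k : Int), mach[k]) := by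
    rcases H.1 with h | ⟨k, hk, hkeq⟩
    · exact ⟨0, hlen, by simpa using h⟩
    · exact ⟨k, hk, by simpa using hkeq⟩
  obtain ⟨k, hk, hkeq⟩ := hform
  refine ⟨k, hk, ?_, ?_⟩
  · simp only [altStep, hget0, ← hr, hkeq]
    have : PySem.List.pyGetD mach (k : Int) 0 = mach[k] :=
      PySem.List.pyGetD_eq_getElem mach 0 (by omega) (by exact_mod_cast hk)
    simp [this]
  · intro x hx
    have := H.2.2 x hx
    rw [hkeq] at this
    exact this

-- One loop step: permuted nonempty states step to permuted states of the same length.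
theorem step_perm (h g : List Int) (job : Int) (hp : h.Perm g) (hne : g ≠ []) :
    ∃ g', altStep g job = some g' ∧ g'.length = g.length ∧
      ∃ h', pvStepA (some h) job = some h' ∧ h'.Perm g' := by
  obtain ⟨i, hi, hstep, hmin⟩ := altStep_spec g job hne
  set a := g[i] with hadef
  have hne' : h ≠ [] := fun hh => hne ((hh ▸ hp).symm.eq_nil)
  have hag : a ∈ g := List.getElem_mem hi
  have hamem : a ∈ h := (List.Perm.mem_iff hp).mpr hag
  -- heappop pops exactly the value a (the minimum of the common multiset)
  have hmn : PySem.List.min? h (fun x => x) = some a := by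
    rcases hmo : PySem.List.min? h (fun x => x) with _ | mn
    · exact absurd ((PySem.List.min?_eq_none_iff _ _).mp hmo) hne'
    · have hmnmem : mn ∈ h := PySem.List.min?_mem hmo
      have h1 : mn ≤ a := PySem.List.min?_isMin hmo a hamem
      have h2 : a ≤ mn := hmin mn ((List.Perm.mem_iff hp).mp hmnmem)
      exact congrArg some (le_antisymm h1 h2)
  refine ⟨g.set i (a + job), hstep, by simp, pvHeappush (h.erase a) (a + job), ?_, ?_⟩
  · simp [pvStepA, pvHeappop, hmn]
  · -- multiset step: (h.erase a) ++ [a + job]  ~  g.set i (a + job)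
    have e1 : (pvHeappush (h.erase a) (a + job)).Perm ((a + job) :: h.erase a) := by
      simp [pvHeappush]
    have e2 : (h.erase a).Perm (g.eraseIdx i) := by
      have p1 : (h.erase a).Perm (g.erase a) := List.Perm.erase a hp
      have p2 : g.Perm (a :: g.erase a) := List.perm_cons_erase hag
      have p3 : g.Perm (a :: g.eraseIdx i) := by
        simpa [← hadef] using (List.getElem_cons_eraseIdx_perm hi).symm
      exact p1.trans ((p2.symm.trans p3).cons_inv)
    have e3 : ((a + job) :: g.eraseIdx i).Perm (g.set i (a + job)) := by
      have hlen' : i < (g.set i (a + job)).length := by simpa using hi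
      have p4 : (g.set i (a + job)).Perm ((g.set i (a + job))[i] :: (g.set i (a + job)).eraseIdx i) :=
        (List.getElem_cons_eraseIdx_perm hlen').symm
      rw [List.getElem_set_self, List.eraseIdx_set_eq] at p4
      exact p4.symm
    exact (e1.trans (e2.cons _)).trans e3

-- The whole loop: both folds succeed and the states stay permutations of each other.
theorem loop_perm (js : List Int) (h g : List Int) (hp : h.Perm g) (hne : g ≠ []) :
    ∃ h' g', js.foldl pvStepA (some h) = some h' ∧
      js.foldl pvStepB (some g) = some g' ∧ h'.Perm g' := by
  induction js generalizing h g with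
  | nil => exact ⟨h, g, rfl, rfl, hp⟩
  | cons j t ih =>
    obtain ⟨g', hstep, hlen, h', hstepA, hperm⟩ := step_perm h g j hp hne
    have hne' : g' ≠ [] := by
      intro hnil
      have : g.length = 0 := by rw [← hlen, hnil]; rfl
      exact hne (List.length_eq_zero_iff.mp this)
    obtain ⟨h'', g'', hfa, hfb, hp''⟩ := ih h' g' hperm hne'
    refine ⟨h'', g'', ?_, ?_, hp''⟩
    · rw [List.foldl_cons, hstepA]; exact hfa
    · rw [List.foldl_cons]
      show t.foldl pvStepB (pvStepB (some g) j) = some g''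
      rw [show pvStepB (some g) j = some g' from hstep]
      exact hfb

-- max(xs) depends only on the multiset of xs.
theorem max_match_perm (h g : List Int) (hp : h.Perm g) :
    (match PySem.List.max? h (fun x => x) with | none => (0 : Int) | some v => v) =
    (match PySem.List.max? g (fun x => x) with | none => (0 : Int) | some v => v) := by
  rcases hh : PySem.List.max? h (fun x => x) with _ | a <;>
    rcases hg : PySem.List.max? g (fun x => x) with _ | b
  · rfl
  · exfalso
    have := (PySem.List.max?_eq_none_iff _ _).mp hh
    rw [this] at hp
    rw [hp.symm.eq_nil] at hg
    simp [(PySem.List.max?_eq_none_iff _ _).mpr rfl] at hg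
  · exfalso
    have := (PySem.List.max?_eq_none_iff _ _).mp hg
    rw [this] at hp
    rw [hp.eq_nil] at hh
    simp [(PySem.List.max?_eq_none_iff _ _).mpr rfl] at hh
  · have hab : a ≤ b := PySem.List.max?_isMax hg a (hp.mem_iff.mp (PySem.List.max?_mem hh))
    have hba : b ≤ a := PySem.List.max?_isMax hh b (hp.mem_iff.mpr (PySem.List.max?_mem hg))
    simpa using le_antisymm hab hba

-- ===== VERDICT (by name: the statement is the Claim_ definition above) =====
theorem assign_jobs_equal_machines_spec : Claim_equal_assign_jobs_equal_machines := by
  intro jobs m _ hpre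
  have hm : 1 ≤ m.toNat := by
    have : (1 : Int) ≤ m := hpre
    omega
  have hne : (List.replicate m.toNat (0 : Int)) ≠ [] := by
    intro hnil
    have := congrArg List.length hnil
    simp at this
    omega
  obtain ⟨h', g', hfa, hfb, hperm⟩ := loop_perm (PySem.List.sorted jobs (fun x => x) true)
    (List.replicate m.toNat 0) (List.replicate m.toNat 0) (List.Perm.refl _) hne
  show assign_jobs_equal_machines jobs m = assign_jobs_equal_machines_alt jobs m
  unfold assign_jobs_equal_machines assign_jobs_equal_machines_alt
  simp only [hfa, hfb]
  exact max_match_perm h' g' hperm
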